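-- pv_equiv track=rewrite | github.com/COMSOC-Community/prefsampling | prefsampling/tree/schroeder.py | _partition_schroeder_nodes
-- ===== SOURCE A (Python) =====
-- from itertools import permutations, combinations_with_replacement, product
--
-- def _partition_schroeder_nodes(num_nodes: int, num_leaves: int) -> list[list[int]]:
--     """
--     Returns all partitions of the number of leaves across the number of internal nodes such that
--     all internal nodes receive at least two leaves.
--
--     Parameters
--     ----------
--         num_nodes: int
--             Number of internal nodes
--         num_leaves: int
--             Number of leaves
--
--     Returns
--     -------
--         list[list[int]]
--             List of lists representing the number of leaves per nodes
--
--     """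
--     res = []
--     num_leaves -= 2 * num_nodes
--     for c in combinations_with_replacement(range(num_nodes), num_leaves):
--         tmp_res = [2 for _ in range(num_nodes)]
--         for i in c:
--             tmp_res[i] += 1
--         res.append(tmp_res)
--     return res
-- ===== SOURCE B (Python) =====
-- def _rec(n, k):
--     # All ways to spread surplus k over n nodes (each node gets 2 + its surplus),
--     # in the same order as combinations_with_replacement enumerates them.
--     if n <= 0:
--         return [[]] if k == 0 else []
--     if k <= 0:
--         return [[2] * n] if k == 0 else []
--     res = []
--     for z in range(n):                 # z leading nodes carry no surplus
--         for a in range(k, 0, -1):      # surplus of the first loaded node, largest first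
--             for tail in _rec(n - z - 1, k - a):
--                 res.append([2] * z + [2 + a] + tail)
--     return res
--
--
-- def _partition_schroeder_nodes(num_nodes: int, num_leaves: int) -> list[list[int]]:
--     return _rec(num_nodes, num_leaves - 2 * num_nodes)
-- ===== Notes on version B (the rewrite author's own statement) =====
-- stated objective: alternative
-- what changed: Replaces enumeration of index multisets via combinations_with_replacement plus per-combination tallying with a direct recursion over nodes that builds each leaf-count vector by choosing the first node's surplus and recursing on the remainder, in the same lexicographic order.
-- crash fix: A raises ValueError (combinations_with_replacement rejects a negative count) whenever num_leaves < 2*num_nodes; B returns [] there, as no valid partition exists. — e.g. on _partition_schroeder_nodes(1, 0): A raises ValueError, B returns []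
import Mathlib
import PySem

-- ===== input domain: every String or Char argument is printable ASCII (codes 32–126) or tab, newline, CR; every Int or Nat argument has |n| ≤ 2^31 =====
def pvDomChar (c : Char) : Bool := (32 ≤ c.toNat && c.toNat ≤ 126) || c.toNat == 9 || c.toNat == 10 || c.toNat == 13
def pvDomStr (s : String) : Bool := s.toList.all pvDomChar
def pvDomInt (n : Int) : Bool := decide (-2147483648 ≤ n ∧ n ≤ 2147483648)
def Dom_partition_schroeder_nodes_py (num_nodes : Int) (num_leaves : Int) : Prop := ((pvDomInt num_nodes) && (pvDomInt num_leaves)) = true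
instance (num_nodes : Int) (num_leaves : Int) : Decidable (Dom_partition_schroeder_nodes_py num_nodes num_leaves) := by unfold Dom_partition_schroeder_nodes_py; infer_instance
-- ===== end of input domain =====

-- B replaces combinations_with_replacement + per-combination tallying by a direct recursion over
-- nodes emitting the leaf-count vectors in the same order (objective: alternative algorithm).

-- ===== PORT A =====
-- itertools.combinations_with_replacement(xs, k), elements kept as tuples-as-lists, in Python's
-- lexicographic emission order (all tuples starting with the head first, then those without it).
-- pvCwrCons is the cons-case of the recursion, recursing structurally on the count.
def pvCwrCons (x : Int) (tail : Nat → List (List Int)) : Nat → List (List Int)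
  | 0 => [[]]
  | k + 1 => (pvCwrCons x tail k).map (fun c => x :: c) ++ tail (k + 1)

def pvCwr : List Int → Nat → List (List Int)
  | [], 0 => [[]]
  | [], _ + 1 => []
  | x :: rest, k => pvCwrCons x (pvCwr rest) k

def partition_schroeder_nodes_py (num_nodes : Int) (num_leaves : Int) : List (List Int) :=
  -- num_leaves -= 2 * num_nodes; then loop over combinations_with_replacement(range(num_nodes), num_leaves)
  -- (the r < 0 ValueError case is excluded by Pre_); tmp_res = [2]*num_nodes; tmp_res[i] += 1 for i in c.
  (pvCwr (PySem.List.pyRange 0 num_nodes 1) (num_leaves - 2 * num_nodes).toNat).map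
    (fun c => c.foldl (fun acc i => acc.modify i.toNat (· + 1)) (List.replicate num_nodes.toNat 2))

-- ===== PORT B =====
-- _rec(n, k) from Source B: spread surplus k = num_leaves - 2*num_nodes over n nodes; z leading nodes
-- carry no surplus, the next node takes a (largest first), recurse on the rest with k - a.
def pvBRec (n : Int) (k : Int) : List (List Int) :=
  if n ≤ 0 then (if k = 0 then [[]] else [])
  else if k ≤ 0 then (if k = 0 then [List.replicate n.toNat 2] else [])
  else
    (PySem.List.pyRange 0 n 1).attach.flatMap (fun z =>
      (PySem.List.pyRange k 0 (-1)).flatMap (fun a =>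
        (pvBRec (n - z.1 - 1) (k - a)).map
          (fun t => List.replicate z.1.toNat 2 ++ ((2 + a) :: t))))
  termination_by n.toNat
  decreasing_by
    have hz := z.2
    rw [PySem.List.mem_pyRange_one] at hz
    omega

def partition_schroeder_nodes_py_alt (num_nodes : Int) (num_leaves : Int) : List (List Int) :=
  pvBRec num_nodes (num_leaves - 2 * num_nodes)

-- ===== PRECONDITION & SPEC =====
-- Pre_ excludes exactly the inputs where A raises: num_leaves - 2*num_nodes < 0 makes
-- combinations_with_replacement raise ValueError ("r must be non-negative").
def Pre_partition_schroeder_nodes_py (num_nodes : Int) (num_leaves : Int) : Prop :=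
  2 * num_nodes ≤ num_leaves
instance (num_nodes : Int) (num_leaves : Int) : Decidable (Pre_partition_schroeder_nodes_py num_nodes num_leaves) := by unfold Pre_partition_schroeder_nodes_py; infer_instance

def pvWitness_partition_schroeder_nodes_py : Int × Int := (2, 6)

-- A raises ValueError whenever num_leaves < 2*num_nodes; B returns [] there (no valid partition
-- exists); checked below by theorem partition_schroeder_nodes_py_raises.
def Raises_partition_schroeder_nodes_py (num_nodes : Int) (num_leaves : Int) : Prop :=
  num_leaves < 2 * num_nodes
instance (num_nodes : Int) (num_leaves : Int) : Decidable (Raises_partition_schroeder_nodes_py num_nodes num_leaves) := by unfold Raises_partition_schroeder_nodes_py; infer_instance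
def pvRaiseWitness_partition_schroeder_nodes_py : Int × Int := (1, 0)
def pvRaiseWitnessOut_partition_schroeder_nodes_py : List (List Int) := []

def Spec_partition_schroeder_nodes_py (num_nodes : Int) (num_leaves : Int) (out : List (List Int)) : Prop := out = partition_schroeder_nodes_py_alt num_nodes num_leaves
instance (num_nodes : Int) (num_leaves : Int) (out : List (List Int)) : Decidable (Spec_partition_schroeder_nodes_py num_nodes num_leaves out) := by unfold Spec_partition_schroeder_nodes_py; infer_instance

-- ===== CLAIM (what is proved, stated in full; the proofs are below) =====
def Claim_equal_partition_schroeder_nodes_py : Prop := ∀ (num_nodes : Int) (num_leaves : Int), Dom_partition_schroeder_nodes_py num_nodes num_leaves → Pre_partition_schroeder_nodes_py num_nodes num_leaves → Spec_partition_schroeder_nodes_py num_nodes num_leaves (partition_schroeder_nodes_py num_nodes num_leaves)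
def Claim_raises_partition_schroeder_nodes_py : Prop := (∀ (num_nodes : Int) (num_leaves : Int), Dom_partition_schroeder_nodes_py num_nodes num_leaves → Raises_partition_schroeder_nodes_py num_nodes num_leaves → ¬ Pre_partition_schroeder_nodes_py num_nodes num_leaves) ∧ (Dom_partition_schroeder_nodes_py (pvRaiseWitness_partition_schroeder_nodes_py.1) (pvRaiseWitness_partition_schroeder_nodes_py.2) ∧ Raises_partition_schroeder_nodes_py (pvRaiseWitness_partition_schroeder_nodes_py.1) (pvRaiseWitness_partition_schroeder_nodes_py.2) ∧ partition_schroeder_nodes_py_alt (pvRaiseWitness_partition_schroeder_nodes_py.1) (pvRaiseWitness_partition_schroeder_nodes_py.2) = pvRaiseWitnessOut_partition_schroeder_nodes_py)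

-- ===== LEMMAS AND PROOFS =====

theorem pvCwr_zero (xs : List Int) : pvCwr xs 0 = [[]] := by
  cases xs <;> simp [pvCwr, pvCwrCons]

-- Unrolling combinations_with_replacement at a cons: group the emitted tuples by how many copies
-- k - d of the head they start with; d (the count left for the tail) runs 0, 1, …, k in that order.
theorem pvCwr_cons (x : Int) (rest : List Int) (k : Nat) :
    pvCwr (x :: rest) k
      = (List.range (k + 1)).flatMap
          (fun d => (pvCwr rest d).map (fun c => List.replicate (k - d) x ++ c)) := by
  induction k with
  | zero => simp [pvCwr, pvCwrCons, pvCwr_zero]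
  | succ k ih =>
    have hstep : pvCwr (x :: rest) (k + 1)
        = (pvCwr (x :: rest) k).map (fun c => x :: c) ++ pvCwr rest (k + 1) := by
      simp [pvCwr, pvCwrCons]
    rw [hstep, ih]
    rw [show List.range (k + 1 + 1) = List.range (k + 1) ++ [k + 1] from List.range_succ,
      List.flatMap_append]
    congr 1
    · rw [List.map_flatMap]
      refine List.flatMap_congr (fun d hd => ?_)
      have hdk : d ≤ k := Nat.lt_succ_iff.mp (List.mem_range.mp hd)
      rw [List.map_map]
      refine List.map_congr_left (fun c _ => ?_)
      simp only [Function.comp]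
      rw [show k + 1 - d = (k - d) + 1 by omega, List.replicate_succ]
      rfl
    · simp

theorem pvCwr_mem (xs : List Int) (k : Nat) (c : List Int) (hc : c ∈ pvCwr xs k) :
    ∀ e ∈ c, e ∈ xs := by
  induction xs generalizing k c with
  | nil =>
    cases k with
    | zero => simp [pvCwr] at hc; simp [hc]
    | succ k => simp [pvCwr] at hc
  | cons x rest ih =>
    rw [pvCwr_cons] at hc
    simp only [List.mem_flatMap, List.mem_map] at hc
    obtain ⟨d, _, c', hc', rfl⟩ := hc
    intro e he
    rcases List.mem_append.mp he with h | h
    · simp [List.eq_of_mem_replicate h]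
    · exact List.mem_cons_of_mem _ (ih d c' hc' e h)

-- A's tally loop characterised by counts: starting from any base list, each pass adds 1 at index i.
theorem pvFoldl_modify_count (c : List Int) (l : List Int)
    (h : ∀ i ∈ c, 0 ≤ i ∧ i.toNat < l.length) :
    c.foldl (fun acc i => acc.modify i.toNat (· + 1)) l
      = l.mapIdx (fun j x => x + (c.count (j : Int) : Int)) := by
  induction c generalizing l with
  | nil =>
    simp only [List.foldl_nil, List.count_nil, Int.natCast_zero, add_zero]
    exact (List.ext_getElem (by simp) (by intro j h1 h2; simp)).symm
  | cons i c ih =>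
    have hi := h i (by simp)
    rw [List.foldl_cons, ih _ (by
      intro e he
      have := h e (by simp [he])
      simpa [List.length_modify] using this)]
    refine List.ext_getElem (by simp [List.length_modify]) ?_
    intro j h1 h2
    simp only [List.getElem_mapIdx]
    rw [List.getElem_modify]
    have hcount : (i :: c).count (j : Int) = c.count (j : Int) + if i = (j : Int) then 1 else 0 := by
      simp [List.count_cons]
    by_cases hij : i.toNat = j
    · have hij' : i = (j : Int) := by omega
      subst hij'
      simp only [Int.toNat_natCast, List.count_cons_self]
      push_cast; ring
    · have hne : ¬ i = (j : Int) := by omega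
      simp only [if_neg hij, hcount, if_neg hne]
      push_cast; ring

-- Proof-side intermediate: the plain one-node-at-a-time recursion (first node's surplus k - d,
-- d ascending), the stepping stone between pvCwr's tallied output and pvBRec's z-grouped loops.
def pvSimple : Nat → Int → List (List Int)
  | 0, k => if k = 0 then [[]] else []
  | n + 1, k =>
    (PySem.List.pyRange 0 (k + 1) 1).flatMap
      (fun d => (pvSimple n d).map (fun t => (2 + (k - d)) :: t))

-- One unrolled step of pvSimple, with its Python range rewritten as a mapped List.range.
theorem pvSimple_succ (n k : Nat) :
    pvSimple (n + 1) (k : Int)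
      = ((List.range (k + 1)).map (fun j : Nat => (j : Int))).flatMap
          (fun d => (pvSimple n d).map (fun t => ((2 : Int) + ((k : Int) - d)) :: t)) := by
  rw [pvSimple, PySem.List.pyRange_one]
  have h1 : ((k : Int) + 1 - 0).toNat = k + 1 := by omega
  rw [h1]
  exact congrArg _ (List.map_congr_left fun j _ => zero_add _)

-- Main bridge: tallying every combination of a duplicate-free pool equals the simple recursion.
theorem pvMain (xs : List Int) (k : Nat) (hnd : xs.Nodup) :
    (pvCwr xs k).map (fun c => xs.map (fun i => (2 : Int) + (c.count i : Int)))
      = pvSimple xs.length (k : Int) := by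
  induction xs generalizing k with
  | nil =>
    cases k with
    | zero => simp [pvCwr, pvSimple]
    | succ k =>
      simp only [pvCwr, List.map_nil, List.length_nil, pvSimple]
      rw [if_neg (by omega : ¬ (((k + 1 : Nat) : Int) = 0))]
  | cons x rest ih =>
    have hx : x ∉ rest := (List.nodup_cons.mp hnd).1
    have hnd' : rest.Nodup := (List.nodup_cons.mp hnd).2
    rw [List.length_cons, pvSimple_succ, pvCwr_cons, List.map_flatMap, List.flatMap_map]
    refine List.flatMap_congr (fun d hd => ?_)
    have hdk : d ≤ k := Nat.lt_succ_iff.mp (List.mem_range.mp hd)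
    rw [← ih d hnd', List.map_map, List.map_map]
    refine List.map_congr_left (fun c hc => ?_)
    have hmem := pvCwr_mem rest d c hc
    have hxc : c.count x = 0 := by
      rw [List.count_eq_zero]
      intro hcx; exact hx (hmem x hcx)
    simp only [Function.comp, List.map_cons]
    congr 1
    · rw [List.count_append, List.count_replicate_self, hxc]
      push_cast [Nat.cast_sub hdk]; ring
    · refine List.map_congr_left (fun i hi => ?_)
      have hix : i ≠ x := fun h => hx (h ▸ hi)
      rw [List.count_append, List.count_replicate]
      simp [Ne.symm hix]

-- Converting the tally's mapIdx-over-replicate form into the pool-map form pvMain wants.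
theorem pvTally_replicate (c : List Int) (n : Nat) :
    (List.replicate n (2 : Int)).mapIdx (fun j x => x + (c.count (j : Int) : Int))
      = ((List.range n).map (fun j : Nat => (j : Int))).map
          (fun i => (2 : Int) + (c.count i : Int)) := by
  refine List.ext_getElem (by simp) ?_
  intro j h1 h2
  simp

-- pvBRec's attached flatMap (needed for termination) re-read as a plain flatMap.
theorem pvFlatMapAttach {α β : Type} (l : List α) (f : α → List β) :
    l.attach.flatMap (fun x => f x.1) = l.flatMap f := by
  rw [← List.flatMap_map, List.attach_map_subtype_val]

theorem pvBRec_unfold_pos (n k : Int) (hn : 0 < n) (hk : 0 < k) :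
    pvBRec n k
      = (PySem.List.pyRange 0 n 1).flatMap (fun z =>
          (PySem.List.pyRange k 0 (-1)).flatMap (fun a =>
            (pvBRec (n - z - 1) (k - a)).map
              (fun t => List.replicate z.toNat 2 ++ ((2 + a) :: t)))) := by
  rw [pvBRec, if_neg (by omega), if_neg (by omega)]
  exact pvFlatMapAttach (PySem.List.pyRange 0 n 1)
    (fun z => (PySem.List.pyRange k 0 (-1)).flatMap (fun a =>
      (pvBRec (n - z - 1) (k - a)).map
        (fun t => List.replicate z.toNat 2 ++ ((2 + a) :: t))))

-- pvBRec on nonnegative arguments, normalised to Nat ranges (z = leading zero-surplus nodes,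
-- a = k - j the surplus of the first loaded node).
theorem pvBRec_pos_eq (n k : Nat) (hk : 0 < k) :
    pvBRec (n : Int) (k : Int)
      = (List.range n).flatMap (fun z : Nat =>
          (List.range k).flatMap (fun j : Nat =>
            (pvBRec ((n - z - 1 : Nat) : Int) ((j : Nat) : Int)).map
              (fun t => List.replicate z 2 ++ (((2 : Int) + ((k : Int) - (j : Int))) :: t)))) := by
  cases n with
  | zero =>
    rw [pvBRec]
    simp [hk.ne']
  | succ m =>
    rw [pvBRec_unfold_pos _ _ (by omega) (by omega), PySem.List.pyRange_one,
      PySem.List.pyRange_neg_one]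
    rw [show (((m + 1 : Nat) : Int) - 0).toNat = m + 1 by omega,
      show (((k : Nat) : Int) - 0).toNat = k by omega, List.flatMap_map]
    refine List.flatMap_congr (fun z hz => ?_)
    have hzn : z < m + 1 := List.mem_range.mp hz
    rw [List.flatMap_map]
    refine List.flatMap_congr (fun j hj => ?_)
    have hjk : j < k := List.mem_range.mp hj
    have e1 : ((m + 1 : Nat) : Int) - (0 + (z : Int)) - 1 = ((m + 1 - z - 1 : Nat) : Int) := by
      omega
    have e2 : ((k : Nat) : Int) - (((k : Nat) : Int) - (j : Int)) = ((j : Nat) : Int) := by ring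
    rw [e1, e2]
    have e3 : ((0 : Int) + (z : Int)).toNat = z := by omega
    rw [e3]

-- With no surplus left every node takes exactly two leaves.
theorem pvSimple_zero (n : Nat) : pvSimple n 0 = [List.replicate n 2] := by
  induction n with
  | zero => simp [pvSimple]
  | succ n ih =>
    rw [pvSimple, show (0 : Int) + 1 = 0 + 1 from rfl, PySem.List.pyRange_one_singleton,
      List.flatMap_singleton, ih]
    simp [List.replicate_succ]

-- The z-grouped surplus recursion of B enumerates exactly what the simple recursion does.
theorem pvBRec_eq_pvSimple (n : Nat) : ∀ (k : Nat), pvBRec (n : Int) (k : Int) = pvSimple n (k : Int) := by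
  induction n with
  | zero =>
    intro k
    rw [pvBRec]
    simp [pvSimple]
  | succ n ih =>
    intro k
    by_cases hk : k = 0
    · subst hk
      rw [pvBRec, if_neg (by omega), if_pos (by norm_num), if_pos (by norm_num)]
      rw [show ((0 : Nat) : Int) = (0 : Int) from rfl, pvSimple_zero]
      norm_num
    · -- k ≥ 1: split off the z = 0 block; the remaining z-blocks are 2-cons of the run over n nodes
      rw [pvSimple_succ n k, List.flatMap_map,
        show List.range (k + 1) = List.range k ++ [k] from List.range_succ,
        List.flatMap_append, List.flatMap_singleton]
      rw [pvBRec_pos_eq (n + 1) k (by omega), List.range_succ_eq_map, List.flatMap_cons,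
        List.flatMap_map]
      congr 1
      · -- z = 0 block versus the d < k part of the simple recursion
        refine List.flatMap_congr (fun j hj => ?_)
        rw [show n + 1 - 0 - 1 = n by omega, ih j]
        rfl
      · -- z ≥ 1 blocks versus the d = k part (a leading 2, then the run over n nodes)
        rw [← ih k, pvBRec_pos_eq n k (by omega), List.map_flatMap]
        refine List.flatMap_congr (fun z hz => ?_)
        rw [List.map_flatMap]
        refine List.flatMap_congr (fun j hj => ?_)
        rw [List.map_map, show n + 1 - Nat.succ z - 1 = n - z - 1 by omega]
        refine List.map_congr_left (fun t _ => ?_)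
        simp [List.replicate_succ]

-- ===== VERDICT (by name: the statements are the Claim_ definitions above) =====
theorem partition_schroeder_nodes_py_spec : Claim_equal_partition_schroeder_nodes_py := by
  intro nn nl _ hpre
  unfold Spec_partition_schroeder_nodes_py partition_schroeder_nodes_py partition_schroeder_nodes_py_alt
  unfold Pre_partition_schroeder_nodes_py at hpre
  set k : Int := nl - 2 * nn with hk
  have hk0 : 0 ≤ k := by omega
  by_cases hnn : nn ≤ 0
  · -- empty pool: range(num_nodes) = [] and tmp_res = []
    have hrep : nn.toNat = 0 := by omega
    rw [PySem.List.pyRange_one_eq_nil hnn, hrep, pvBRec, if_pos hnn]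
    by_cases hk' : k = 0
    · rw [hk']
      simp [pvCwr]
    · obtain ⟨m, hm⟩ := Nat.exists_eq_succ_of_ne_zero (by omega : k.toNat ≠ 0)
      rw [hm, if_neg hk']
      simp [pvCwr]
  · -- positive pool: rewrite the tally loop into counts, then bridge through pvSimple
    have hA : (pvCwr (PySem.List.pyRange 0 nn 1) k.toNat).map
        (fun c => c.foldl (fun acc i => acc.modify i.toNat (· + 1)) (List.replicate nn.toNat 2))
        = (pvCwr (PySem.List.pyRange 0 nn 1) k.toNat).map
        (fun c => (PySem.List.pyRange 0 nn 1).map (fun i => (2 : Int) + (c.count i : Int))) := by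
      refine List.map_congr_left (fun c hc => ?_)
      rw [pvFoldl_modify_count c _ (by
        intro i hi
        have := pvCwr_mem _ _ c hc i hi
        rw [PySem.List.mem_pyRange_one] at this
        constructor
        · exact this.1
        · simp only [List.length_replicate]; omega)]
      rw [pvTally_replicate]
      congr 1
      rw [PySem.List.pyRange_one]
      have h0 : (nn - 0).toNat = nn.toNat := by omega
      rw [h0]
      refine List.map_congr_left (fun j _ => ?_)
      omega
    rw [hA, pvMain _ _ (PySem.List.nodup_pyRange_one 0 nn)]
    have h1 : (PySem.List.pyRange 0 nn 1).length = nn.toNat := by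
      rw [PySem.List.length_pyRange_one]; omega
    have hb : pvBRec nn k = pvSimple nn.toNat ((k.toNat : Nat) : Int) := by
      rw [show nn = ((nn.toNat : Nat) : Int) by omega, show k = ((k.toNat : Nat) : Int) by omega]
      exact pvBRec_eq_pvSimple nn.toNat k.toNat
    rw [h1, hb]

theorem partition_schroeder_nodes_py_raises : Claim_raises_partition_schroeder_nodes_py := by
  unfold Claim_raises_partition_schroeder_nodes_py
  constructor
  · intro nn nl _ hr hp
    unfold Raises_partition_schroeder_nodes_py at hr
    unfold Pre_partition_schroeder_nodes_py at hp
    omega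
  · refine ⟨by decide, by decide, ?_⟩
    show partition_schroeder_nodes_py_alt 1 0 = []
    unfold partition_schroeder_nodes_py_alt
    rw [pvBRec, if_neg (by norm_num), if_pos (by norm_num), if_neg (by norm_num)]

-- Witness self-check kept explicit: B's port returns [] at the excluded witness input where A raises.
theorem pvRaiseValue_ok :
    partition_schroeder_nodes_py_alt (pvRaiseWitness_partition_schroeder_nodes_py.1)
      (pvRaiseWitness_partition_schroeder_nodes_py.2) = pvRaiseWitnessOut_partition_schroeder_nodes_py :=
  partition_schroeder_nodes_py_raises.2.2.2
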